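-- pv_equiv track=rewrite | github.com/yaroslav711/aith_llm | eval/run_eval.py | compute_no_double_messaging
-- ===== SOURCE A (Python) =====
-- from typing import Any, Dict, List, Optional, Tuple
--
-- def compute_no_double_messaging(
--     waiting_for_reply: Dict[str, bool],
--     agent_messages: List[Dict[str, Any]],
-- ) -> int:
--     violations = 0
--     for m in agent_messages:
--         r = m.get("recipient")
--         if r in ("user_1", "user_2"):
--             if waiting_for_reply.get(r, False):
--                 violations += 1
--             waiting_for_reply[r] = True
--     return violations
-- ===== SOURCE B (Python) =====
-- def compute_no_double_messaging(waiting_for_reply, agent_messages):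
--     violations = 0
--     for r in ("user_1", "user_2"):
--         c = sum(1 for m in agent_messages if m.get("recipient") == r)
--         if c:
--             violations += c if waiting_for_reply.get(r, False) else c - 1
--             waiting_for_reply[r] = True
--     return violations
-- ===== Notes on version B (the rewrite author's own statement) =====
-- stated objective: alternative
-- what changed: B replaces A's per-message stateful was-waiting branch by a grouping pass: for each relevant recipient it tallies its messages once and adds the closed form (c if initially waiting else c-1), reading each initial flag only once.
import Mathlib
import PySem

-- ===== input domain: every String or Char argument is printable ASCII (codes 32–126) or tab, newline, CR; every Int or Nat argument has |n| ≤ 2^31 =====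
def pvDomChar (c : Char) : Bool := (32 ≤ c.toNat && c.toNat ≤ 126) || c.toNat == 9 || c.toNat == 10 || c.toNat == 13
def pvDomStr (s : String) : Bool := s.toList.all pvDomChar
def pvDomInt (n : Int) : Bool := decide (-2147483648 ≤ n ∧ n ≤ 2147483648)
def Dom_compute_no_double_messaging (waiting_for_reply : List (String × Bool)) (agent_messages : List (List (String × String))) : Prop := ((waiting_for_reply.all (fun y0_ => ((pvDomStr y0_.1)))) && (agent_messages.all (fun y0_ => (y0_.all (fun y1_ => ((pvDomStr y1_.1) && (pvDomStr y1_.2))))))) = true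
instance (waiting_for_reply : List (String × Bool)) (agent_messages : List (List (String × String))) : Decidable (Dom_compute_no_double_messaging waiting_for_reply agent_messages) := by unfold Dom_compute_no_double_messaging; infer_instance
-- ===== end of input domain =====

-- ===== PORT A =====
-- Header: B groups by recipient and uses closed-form arithmetic; same return value. Both Pythons
-- mutate waiting_for_reply (A/B set the same keys to True; only key insertion order may differ);
-- the equivalence proved here is about the RETURN value only.
def compute_no_double_messaging (waiting_for_reply : List (String × Bool)) (agent_messages : List (List (String × String))) : Int :=
  (agent_messages.foldl
    (fun (st : PySem.Dict String Bool × Int) m =>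
      match (PySem.Dict.mk m).get? "recipient" with
      | some r =>
        if r = "user_1" ∨ r = "user_2" then
          (st.1.insert r true, st.2 + (if st.1.getD r false then 1 else 0))
        else st
      | none => st)
    (PySem.Dict.mk waiting_for_reply, 0)).2

-- ===== PORT B =====
def compute_no_double_messaging_alt (waiting_for_reply : List (String × Bool)) (agent_messages : List (List (String × String))) : Int :=
  (["user_1", "user_2"].foldl
    (fun (violations : Int) r =>
      let c := (agent_messages.filter (fun m => (PySem.Dict.mk m).get? "recipient" == some r)).length
      if c ≠ 0 then
        violations + (if (PySem.Dict.mk waiting_for_reply).getD r false then (c : Int) else (c : Int) - 1)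
      else violations)
    0)

-- ===== PRECONDITION & SPEC =====
def Spec_compute_no_double_messaging (waiting_for_reply : List (String × Bool)) (agent_messages : List (List (String × String))) (out : Int) : Prop := out = compute_no_double_messaging_alt waiting_for_reply agent_messages
instance (waiting_for_reply : List (String × Bool)) (agent_messages : List (List (String × String))) (out : Int) : Decidable (Spec_compute_no_double_messaging waiting_for_reply agent_messages out) := by unfold Spec_compute_no_double_messaging; infer_instance

-- ===== CLAIM (what is proved, stated in full; the proofs are below) =====
def Claim_equal_compute_no_double_messaging : Prop := ∀ (waiting_for_reply : List (String × Bool)) (agent_messages : List (List (String × String))), Dom_compute_no_double_messaging waiting_for_reply agent_messages → Spec_compute_no_double_messaging waiting_for_reply agent_messages (compute_no_double_messaging waiting_for_reply agent_messages)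

-- ===== LEMMAS AND PROOFS =====

def pvG (b : Bool) (c : Nat) : Int := if c = 0 then 0 else if b then (c : Int) else (c : Int) - 1

def pvCnt (r : String) (ams : List (List (String × String))) : Nat :=
  (ams.filter (fun m => (PySem.Dict.mk m).get? "recipient" == some r)).length

lemma pvG_true (c : Nat) : pvG true c = (c : Int) := by
  unfold pvG; split <;> simp_all

lemma pvLoopA (ams : List (List (String × String))) (d : PySem.Dict String Bool) (v : Int) :
    (ams.foldl
      (fun (st : PySem.Dict String Bool × Int) m =>
        match (PySem.Dict.mk m).get? "recipient" with
        | some r =>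
          if r = "user_1" ∨ r = "user_2" then
            (st.1.insert r true, st.2 + (if st.1.getD r false then 1 else 0))
          else st
        | none => st)
      (d, v)).2
    = v + pvG (d.getD "user_1" false) (pvCnt "user_1" ams)
        + pvG (d.getD "user_2" false) (pvCnt "user_2" ams) := by
  induction ams generalizing d v with
  | nil => simp [pvG, pvCnt]
  | cons m rest ih =>
    simp only [List.foldl_cons]
    cases hr : (PySem.Dict.mk m).get? "recipient" with
    | none =>
      rw [ih]
      have h1 : pvCnt "user_1" (m :: rest) = pvCnt "user_1" rest := by
        simp [pvCnt, hr]
      have h2 : pvCnt "user_2" (m :: rest) = pvCnt "user_2" rest := by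
        simp [pvCnt, hr]
      rw [h1, h2]
    | some r =>
      simp only [hr]
      by_cases hmem : r = "user_1" ∨ r = "user_2"
      · rw [if_pos hmem]
        rw [ih]
        rcases hmem with h | h
        · subst h
          have h1 : pvCnt "user_1" (m :: rest) = pvCnt "user_1" rest + 1 := by
            simp [pvCnt, hr]
          have h2 : pvCnt "user_2" (m :: rest) = pvCnt "user_2" rest := by
            simp [pvCnt, hr]
          rw [h1, h2,
            PySem.Dict.getD_insert_self,
            PySem.Dict.getD_insert, if_neg (by decide : ¬ ("user_2" : String) = "user_1"),
            pvG_true]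
          cases hb : d.getD "user_1" false <;>
            simp [pvG, hb] <;> omega
        · subst h
          have h1 : pvCnt "user_1" (m :: rest) = pvCnt "user_1" rest := by
            simp [pvCnt, hr]
          have h2 : pvCnt "user_2" (m :: rest) = pvCnt "user_2" rest + 1 := by
            simp [pvCnt, hr]
          rw [h1, h2,
            PySem.Dict.getD_insert_self,
            PySem.Dict.getD_insert, if_neg (by decide : ¬ ("user_1" : String) = "user_2"),
            pvG_true]
          cases hb : d.getD "user_2" false <;>
            simp [pvG, hb] <;> omega
      · rw [if_neg hmem]
        rw [ih]
        rw [not_or] at hmem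
        have h1 : pvCnt "user_1" (m :: rest) = pvCnt "user_1" rest := by
          simp [pvCnt, hr, hmem.1]
        have h2 : pvCnt "user_2" (m :: rest) = pvCnt "user_2" rest := by
          simp [pvCnt, hr, hmem.2]
        rw [h1, h2]

lemma pvAltEq (w : List (String × Bool)) (ams : List (List (String × String))) :
    compute_no_double_messaging_alt w ams
    = pvG ((PySem.Dict.mk w).getD "user_1" false) (pvCnt "user_1" ams)
      + pvG ((PySem.Dict.mk w).getD "user_2" false) (pvCnt "user_2" ams) := by
  unfold compute_no_double_messaging_alt
  simp only [List.foldl_cons, List.foldl_nil, pvG, pvCnt]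
  cases h1 : (ams.filter (fun m => (PySem.Dict.mk m).get? "recipient" == some "user_1")).length <;>
  cases h2 : (ams.filter (fun m => (PySem.Dict.mk m).get? "recipient" == some "user_2")).length <;>
  cases (PySem.Dict.mk w).getD "user_1" false <;>
  cases (PySem.Dict.mk w).getD "user_2" false <;>
  simp <;> omega

-- ===== VERDICT (by name: the statement is the Claim_ definition above) =====
theorem compute_no_double_messaging_spec : Claim_equal_compute_no_double_messaging := by
  intro w ams _
  unfold Spec_compute_no_double_messaging
  rw [pvAltEq]
  unfold compute_no_double_messaging
  rw [pvLoopA]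
  omega
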